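-- pv_equiv track=rewrite | github.com/nguyenngoctruong2k1/CS114.L22.KHCL | Python/Assignment_Week_1.2/NgonNguCuaLan_v2.py | menhde
-- ===== SOURCE A (Python) =====
-- def tinhtu(str):
-- 	if str.find('lios') > -1 and str.find('lios') - len(str) == -4:
-- 		return 0
-- 	elif str.find('liala') > -1 and str.find('liala') - len(str) == -5:
-- 		return 1
-- 	else:
-- 		return -1
--
-- def danhtu(str):
-- 	if str.find('etr') - len(str) == -3:
-- 		return 0
-- 	elif str.find('etra') - len(str) == -4:
-- 		return 1
-- 	else:
-- 		return -1
--
-- def dongtu(str):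
-- 	if str.find('initis') - len(str) == -6:
-- 		return 0
-- 	elif str.find('inites') - len(str) == -6:
-- 		return 1
-- 	else:
-- 		return -1
--
-- def tu(arr):
-- 	if tinhtu(arr) >=0:
-- 		return 0 + tinhtu(arr)
-- 	elif danhtu(arr) >=0:
-- 		return 2 + danhtu(arr)
-- 	elif dongtu(arr) >=0:
-- 		return 4 + dongtu(arr)
-- 	else:
-- 		return -1
--
-- def menhde(arr):
-- 	pre = -1
-- 	dt = False
-- 	for i in arr:
-- 		if tu(i) == -1:
-- 			return False
-- 		if pre > -1:
-- 			if (pre - tu(i)) % 2 == 1: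
-- 				return False
-- 			if pre > tu(i):
-- 				return False
--
-- 		if tu(i) // 2 == 1:
-- 				if dt:
-- 					return False
-- 				else:
-- 					dt = True
-- 		pre = tu(i)
-- 	if not dt:
-- 		return dt
-- 	return True
-- ===== SOURCE B (Python) =====
-- # Same classifier helpers as A (their no-guard find quirks are part of the behaviour).
-- def tinhtu(str):
-- 	if str.find('lios') > -1 and str.find('lios') - len(str) == -4:
-- 		return 0
-- 	elif str.find('liala') > -1 and str.find('liala') - len(str) == -5:
-- 		return 1
-- 	else:
-- 		return -1
--
-- def danhtu(str):
-- 	if str.find('etr') - len(str) == -3: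
-- 		return 0
-- 	elif str.find('etra') - len(str) == -4:
-- 		return 1
-- 	else:
-- 		return -1
--
-- def dongtu(str):
-- 	if str.find('initis') - len(str) == -6:
-- 		return 0
-- 	elif str.find('inites') - len(str) == -6:
-- 		return 1
-- 	else:
-- 		return -1
--
-- def tu(arr):
-- 	if tinhtu(arr) >=0:
-- 		return 0 + tinhtu(arr)
-- 	elif danhtu(arr) >=0:
-- 		return 2 + danhtu(arr)
-- 	elif dongtu(arr) >=0:
-- 		return 4 + dongtu(arr)
-- 	else:
-- 		return -1
--
-- def menhde(arr):
-- 	types = [tu(w) for w in arr]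
-- 	if not types or -1 in types:
-- 		return False
-- 	p = types[0] % 2
-- 	return (all(t % 2 == p for t in types)
-- 		and types == sorted(types)
-- 		and sum(1 for t in types if t in (2, 3)) == 1)
-- ===== Notes on version B (the rewrite author's own statement) =====
-- stated objective: alternative
-- what changed: B keeps the quirky suffix classifiers verbatim but replaces A's incremental pre/dt state machine (with early returns and pairwise parity/order checks) by whole-sequence predicates over a precomputed type list: no -1 type, all types share the first type's parity, the list equals its sorted copy, and exactly one noun type.
import Mathlib
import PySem

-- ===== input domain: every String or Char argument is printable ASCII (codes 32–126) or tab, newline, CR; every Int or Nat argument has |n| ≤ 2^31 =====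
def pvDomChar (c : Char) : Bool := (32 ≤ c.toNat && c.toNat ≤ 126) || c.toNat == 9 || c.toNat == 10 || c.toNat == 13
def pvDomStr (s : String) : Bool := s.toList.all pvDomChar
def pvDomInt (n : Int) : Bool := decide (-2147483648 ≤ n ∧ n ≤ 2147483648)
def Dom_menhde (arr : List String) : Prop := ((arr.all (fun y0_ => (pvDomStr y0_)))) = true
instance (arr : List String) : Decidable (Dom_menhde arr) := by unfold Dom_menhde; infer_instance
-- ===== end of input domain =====

-- B replaces A's incremental pre/dt state machine by whole-sequence predicates over a
-- precomputed type list (simpler decomposition; the quirky classifier helpers are kept verbatim).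

-- ===== PORT A =====
def tinhtu (s : String) : Int :=
  if PySem.Str.find s "lios" > -1 ∧ PySem.Str.find s "lios" - PySem.Str.len s = -4 then 0
  else if PySem.Str.find s "liala" > -1 ∧ PySem.Str.find s "liala" - PySem.Str.len s = -5 then 1
  else -1

def danhtu (s : String) : Int :=
  if PySem.Str.find s "etr" - PySem.Str.len s = -3 then 0
  else if PySem.Str.find s "etra" - PySem.Str.len s = -4 then 1
  else -1

def dongtu (s : String) : Int :=
  if PySem.Str.find s "initis" - PySem.Str.len s = -6 then 0
  else if PySem.Str.find s "inites" - PySem.Str.len s = -6 then 1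
  else -1

def tu (s : String) : Int :=
  if tinhtu s ≥ 0 then 0 + tinhtu s
  else if danhtu s ≥ 0 then 2 + danhtu s
  else if dongtu s ≥ 0 then 4 + dongtu s
  else -1

def menhdeLoop : List String → Int → Bool → Bool
  | [], _, dt => if !dt then dt else true
  | i :: rest, pre, dt =>
    if tu i = -1 then false
    else if pre > -1 ∧ PySem.Int.mod (pre - tu i) 2 = 1 then false
    else if pre > -1 ∧ pre > tu i then false
    else if PySem.Int.floordiv (tu i) 2 = 1 then
      if dt then false else menhdeLoop rest (tu i) true
    else menhdeLoop rest (tu i) dt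

def menhde (arr : List String) : Bool := menhdeLoop arr (-1) false

-- ===== PORT B =====
def menhde_alt (arr : List String) : Bool :=
  let types := arr.map tu
  match types with
  | [] => false
  | t0 :: _ =>
    if types.contains (-1) then false
    else
      let p := PySem.Int.mod t0 2
      types.all (fun t => PySem.Int.mod t 2 = p)
      && decide (types = PySem.List.sorted types (fun x => x) false)
      && (types.countP (fun t => t = 2 ∨ t = 3) = 1)

-- ===== PRECONDITION & SPEC =====
def Spec_menhde (arr : List String) (out : Bool) : Prop := out = menhde_alt arr
instance (arr : List String) (out : Bool) : Decidable (Spec_menhde arr out) := by unfold Spec_menhde; infer_instance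

-- ===== CLAIM (what is proved, stated in full; the proofs are below) =====
def Claim_equal_menhde : Prop := ∀ (arr : List String), Dom_menhde arr → Spec_menhde arr (menhde arr)

-- ===== LEMMAS AND PROOFS =====

-- the adjacent-pair check of A's loop, over the list of word types
def chainB : Int → List Int → Bool
  | _, [] => true
  | pre, t :: r =>
    (if pre > -1 then (!(PySem.Int.mod (pre - t) 2 = 1 : Bool)) && (!(pre > t : Bool)) else true)
      && chainB t r

lemma tinhtu_cases (s : String) : tinhtu s = 0 ∨ tinhtu s = 1 ∨ tinhtu s = -1 := by
  unfold tinhtu; split_ifs <;> simp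

lemma danhtu_cases (s : String) : danhtu s = 0 ∨ danhtu s = 1 ∨ danhtu s = -1 := by
  unfold danhtu; split_ifs <;> simp

lemma dongtu_cases (s : String) : dongtu s = 0 ∨ dongtu s = 1 ∨ dongtu s = -1 := by
  unfold dongtu; split_ifs <;> simp

lemma tu_nonneg_of_ne (s : String) (h : tu s ≠ -1) : 0 ≤ tu s := by
  unfold tu at *
  rcases tinhtu_cases s with h1 | h1 | h1 <;>
  rcases danhtu_cases s with h2 | h2 | h2 <;>
  rcases dongtu_cases s with h3 | h3 | h3 <;>
    simp [h1, h2, h3] at *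

lemma chain_head_true (pre t : Int)
    (h2 : ¬(pre > -1 ∧ PySem.Int.mod (pre - t) 2 = 1))
    (h3 : ¬(pre > -1 ∧ pre > t)) :
    (if pre > -1 then (!(PySem.Int.mod (pre - t) 2 = 1 : Bool)) && (!(pre > t : Bool))
     else true) = true := by
  split_ifs with hp
  · simp only [Bool.and_eq_true, Bool.not_eq_true', decide_eq_false_iff_not]
    exact ⟨fun h => h2 ⟨hp, h⟩, fun h => h3 ⟨hp, h⟩⟩
  · rfl

lemma loop_true_iff : ∀ (arr : List String) (pre : Int) (dt : Bool),
    menhdeLoop arr pre dt = true ↔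
      ((∀ s ∈ arr, ¬ tu s = -1) ∧ chainB pre (arr.map tu) = true ∧
        ((if dt then (1:Nat) else 0) +
          (arr.map tu).countP (fun t => PySem.Int.floordiv t 2 = 1) = 1))
  | [], pre, dt => by cases dt <;> simp [menhdeLoop, chainB]
  | i :: rest, pre, dt => by
    have ih := loop_true_iff rest (tu i)
    rw [menhdeLoop]
    by_cases h1 : tu i = -1
    · rw [if_pos h1]
      simp only [Bool.false_eq_true, false_iff]
      rintro ⟨hv, -, -⟩
      exact hv i (by simp) h1
    · rw [if_neg h1]
      by_cases h2 : pre > -1 ∧ PySem.Int.mod (pre - tu i) 2 = 1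
      · rw [if_pos h2]
        simp only [Bool.false_eq_true, false_iff]
        rintro ⟨-, hc, -⟩
        rw [List.map_cons, chainB, if_pos h2.1] at hc
        simp only [Bool.and_eq_true, Bool.not_eq_true', decide_eq_false_iff_not] at hc
        exact hc.1.1 h2.2
      · rw [if_neg h2]
        by_cases h3 : pre > -1 ∧ pre > tu i
        · rw [if_pos h3]
          simp only [Bool.false_eq_true, false_iff]
          rintro ⟨-, hc, -⟩
          rw [List.map_cons, chainB, if_pos h3.1] at hc
          simp only [Bool.and_eq_true, Bool.not_eq_true', decide_eq_false_iff_not] at hc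
          exact hc.1.2 h3.2
        · rw [if_neg h3]
          by_cases h4 : PySem.Int.floordiv (tu i) 2 = 1
          · rw [if_pos h4]
            cases dt with
            | true =>
              rw [if_pos rfl]
              simp only [Bool.false_eq_true, false_iff]
              rintro ⟨-, -, hn⟩
              rw [List.map_cons, List.countP_cons] at hn
              simp only [h4, decide_true, if_pos] at hn
              omega
            | false =>
              rw [if_neg (by simp), ih]
              constructor
              · rintro ⟨hv, hc, hn⟩
                refine ⟨fun s hs => ?_, ?_, ?_⟩
                · rcases List.mem_cons.mp hs with rfl | hs
                  · exact h1
                  · exact hv s hs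
                · rw [List.map_cons, chainB, chain_head_true pre (tu i) h2 h3, Bool.true_and]
                  exact hc
                · rw [List.map_cons, List.countP_cons]
                  have h4' : tu i / 2 = 1 := by
                    rw [← PySem.Int.floordiv_eq_ediv_of_pos (by omega : (0:Int) < 2)]
                    exact h4
                  simp [h4'] at hn ⊢
                  omega
              · rintro ⟨hv, hc, hn⟩
                rw [List.map_cons, chainB, chain_head_true pre (tu i) h2 h3,
                  Bool.true_and] at hc
                rw [List.map_cons, List.countP_cons] at hn
                have h4' : tu i / 2 = 1 := by
                  rw [← PySem.Int.floordiv_eq_ediv_of_pos (by omega : (0:Int) < 2)]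
                  exact h4
                simp [h4'] at hn
                refine ⟨fun s hs => hv s (List.mem_cons_of_mem _ hs), hc, ?_⟩
                simp
                omega
          · rw [if_neg h4, ih]
            have h4' : ¬ tu i / 2 = 1 := by
              rw [← PySem.Int.floordiv_eq_ediv_of_pos (by omega : (0:Int) < 2)]
              exact h4
            constructor
            · rintro ⟨hv, hc, hn⟩
              refine ⟨fun s hs => ?_, ?_, ?_⟩
              · rcases List.mem_cons.mp hs with rfl | hs
                · exact h1
                · exact hv s hs
              · rw [List.map_cons, chainB, chain_head_true pre (tu i) h2 h3, Bool.true_and]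
                exact hc
              · rw [List.map_cons, List.countP_cons]
                cases dt <;> simp [h4'] at hn ⊢ <;> omega
            · rintro ⟨hv, hc, hn⟩
              rw [List.map_cons, chainB, chain_head_true pre (tu i) h2 h3,
                Bool.true_and] at hc
              rw [List.map_cons, List.countP_cons] at hn
              refine ⟨fun s hs => hv s (List.mem_cons_of_mem _ hs), hc, ?_⟩
              cases dt <;> simp [h4'] at hn ⊢ <;> omega

lemma parity_sub (a b : Int) :
    PySem.Int.mod (a - b) 2 = 1 ↔ PySem.Int.mod a 2 ≠ PySem.Int.mod b 2 := by
  simp only [PySem.Int.mod_eq_emod_of_pos (show (0:Int) < 2 by omega)]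
  omega

lemma chainB_eq (r : List Int) (t0 : Int) (h0 : 0 ≤ t0) (hr : ∀ t ∈ r, 0 ≤ t) :
    chainB t0 r = true ↔
      (∀ t ∈ r, PySem.Int.mod t 2 = PySem.Int.mod t0 2) ∧ List.IsChain (· ≤ ·) (t0 :: r) := by
  induction r generalizing t0 with
  | nil => simp [chainB]
  | cons t1 r' ih =>
    have ht1 : 0 ≤ t1 := hr t1 (by simp)
    have hguard : t0 > -1 := by omega
    rw [chainB]
    simp only [if_pos hguard, Bool.and_eq_true, Bool.not_eq_true', decide_eq_false_iff_not,
      ih t1 ht1 (fun t ht => hr t (List.mem_cons_of_mem _ ht)), List.isChain_cons_cons,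
      List.mem_cons, parity_sub]
    constructor
    · rintro ⟨⟨hpar, hle⟩, hall, hch⟩
      have hp01 : PySem.Int.mod t1 2 = PySem.Int.mod t0 2 := by tauto
      exact ⟨fun t ht => by rcases ht with rfl | ht; exact hp01; exact (hall t ht).trans hp01,
        by omega, hch⟩
    · rintro ⟨hall, hle, hch⟩
      have hp01 : PySem.Int.mod t1 2 = PySem.Int.mod t0 2 := hall t1 (Or.inl rfl)
      exact ⟨⟨by tauto, by omega⟩,
        fun t ht => (hall t (Or.inr ht)).trans hp01.symm, hch⟩

lemma floordiv_two_eq_one (t : Int) : PySem.Int.floordiv t 2 = 1 ↔ (t = 2 ∨ t = 3) := by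
  rw [PySem.Int.floordiv_eq_iff_of_pos (by omega)]; omega

lemma sorted_self_iff (ts : List Int) :
    ts = PySem.List.sorted ts (fun x => x) false ↔ ts.Pairwise (· ≤ ·) := by
  constructor
  · intro h
    have := PySem.List.sorted_pairwise (xs := ts) (key := fun x : Int => x)
    rw [← h] at this
    exact this
  · intro h
    exact (PySem.List.sorted_eq_self_of_pairwise ts (fun x => x) (by simpa using h)).symm

theorem menhde_eq_alt (arr : List String) : menhde arr = menhde_alt arr := by
  rw [Bool.eq_iff_iff, menhde, loop_true_iff, menhde_alt]
  cases harr : arr.map tu with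
  | nil =>
    simp [chainB]
  | cons t0 r =>
    by_cases hval : ∃ s ∈ arr, tu s = -1
    · obtain ⟨s, hs, hsv⟩ := hval
      have hc : (t0 :: r).contains (-1) = true := by
        rw [← harr]
        simp only [List.contains_eq_any_beq, List.any_eq_true]
        exact ⟨tu s, List.mem_map.mpr ⟨s, hs, rfl⟩, by simp [hsv]⟩
      simp only [hc, if_true, Bool.false_eq_true, iff_false, not_and]
      intro hv
      exact absurd hsv (hv s hs)
    · push Not at hval
      have hmemtu : ∀ t ∈ t0 :: r, 0 ≤ t := by
        intro t ht
        rw [← harr] at ht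
        rcases List.mem_map.mp ht with ⟨s, hs, rfl⟩
        exact tu_nonneg_of_ne s (hval s hs)
      have hnc : (t0 :: r).contains (-1) = false := by
        simp only [List.contains_eq_any_beq, List.any_eq_false]
        intro t ht
        have := hmemtu t ht
        simp only [beq_iff_eq]
        omega
      have h0 : (0:Int) ≤ t0 := hmemtu t0 (by simp)
      have hr : ∀ t ∈ r, 0 ≤ t := fun t ht => hmemtu t (List.mem_cons_of_mem _ ht)
      have hchainhd : chainB (-1) (t0 :: r) = chainB t0 r := by
        rw [chainB]
        norm_num
      have hcount : (t0 :: r).countP (fun t => decide (PySem.Int.floordiv t 2 = 1))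
          = (t0 :: r).countP (fun t => decide (t = 2 ∨ t = 3)) := by
        apply List.countP_congr
        intro t _
        rw [decide_eq_decide.mpr (floordiv_two_eq_one t)]
      simp only [hnc, Bool.false_eq_true, if_false, hchainhd, hcount,
        Bool.and_eq_true, List.all_eq_true, decide_eq_true_eq]
      constructor
      · rintro ⟨-, hc, hn⟩
        rcases (chainB_eq r t0 h0 hr).mp hc with ⟨hpar, hcha⟩
        refine ⟨⟨fun t ht => ?_, ?_⟩, by omega⟩
        · rcases List.mem_cons.mp ht with rfl | ht
          · rfl
          · exact hpar t ht
        · exact (sorted_self_iff (t0 :: r)).mpr (List.isChain_iff_pairwise.mp hcha)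
      · rintro ⟨⟨hpar, hsorted⟩, hn⟩
        refine ⟨hval, ?_, by omega⟩
        refine (chainB_eq r t0 h0 hr).mpr ⟨fun t ht => hpar t (List.mem_cons_of_mem _ ht), ?_⟩
        exact List.isChain_iff_pairwise.mpr ((sorted_self_iff (t0 :: r)).mp hsorted)

-- ===== VERDICT (by name: the statement is the Claim_ definition above) =====
theorem menhde_spec : Claim_equal_menhde := by
  intro arr _
  exact menhde_eq_alt arr
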